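-- pv_equiv track=rewrite | github.com/Client-Specific-Equivalence-Checker/CLEVER | examples/equiv/is_prime1/is_prime1.py | lib
-- ===== SOURCE A (Python) =====
-- primes = [ 2, 3, 5, 7, 11, 13, 17, 19 ]
--
-- def lib(x, b):
--   if (b == 0):
--     return 0
--   else:
--     for p in primes:
--       mod = x % p
--       if (mod == 0):
--         return 0
--   return 1
-- ===== SOURCE B (Python) =====
-- def lib(x, b):
--     # simpler: one Euclid gcd against the constant product of the eight primes
--     # replaces the per-prime divisibility scan.
--     if b == 0:
--         return 0
--     a, c = abs(x), 9699690  # 2*3*5*7*11*13*17*19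
--     while c:
--         a, c = c, a % c
--     return 1 if a == 1 else 0
-- ===== Notes on version B (the rewrite author's own statement) =====
-- stated objective: alternative
-- what changed: replaces the loop over the eight-prime list with a single Euclidean gcd of |x| against the constant product 9699690, returning 1 iff the gcd is 1
import Mathlib
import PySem

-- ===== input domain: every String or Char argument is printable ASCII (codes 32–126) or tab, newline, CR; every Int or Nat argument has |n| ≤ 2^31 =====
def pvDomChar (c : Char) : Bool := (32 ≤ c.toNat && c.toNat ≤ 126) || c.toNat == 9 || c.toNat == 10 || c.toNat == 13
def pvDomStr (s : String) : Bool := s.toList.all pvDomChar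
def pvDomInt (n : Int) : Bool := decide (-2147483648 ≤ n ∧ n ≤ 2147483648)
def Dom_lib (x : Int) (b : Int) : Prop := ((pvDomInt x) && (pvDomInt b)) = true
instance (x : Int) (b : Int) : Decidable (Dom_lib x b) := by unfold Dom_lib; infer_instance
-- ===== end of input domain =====

-- B replaces A's loop over the prime list with one Euclidean gcd of |x| against the
-- constant product 9699690 of those primes (alternative decomposition, same cost).

-- ===== PORT A =====
def pvPrimes : List Int := [2, 3, 5, 7, 11, 13, 17, 19]

-- the for-loop over primes with early return 0
def pvLoopA : List Int → Int → Int
  | [], _ => 1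
  | p :: ps, x => if PySem.Int.mod x p = 0 then 0 else pvLoopA ps x

def lib (x : Int) (b : Int) : Int :=
  if b = 0 then 0 else pvLoopA pvPrimes x

-- ===== PORT B =====
-- the while-loop Euclid from Source B: a, c = c, a % c until c = 0
def pvEuclid (a c : Nat) : Nat :=
  if c = 0 then a else pvEuclid c (a % c)
decreasing_by exact Nat.mod_lt _ (Nat.pos_of_ne_zero ‹_›)

def lib_alt (x : Int) (b : Int) : Int :=
  if b = 0 then 0
  else if pvEuclid x.natAbs 9699690 = 1 then 1 else 0

-- ===== PRECONDITION & SPEC =====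
def Spec_lib (x : Int) (b : Int) (out : Int) : Prop := out = lib_alt x b
instance (x : Int) (b : Int) (out : Int) : Decidable (Spec_lib x b out) := by unfold Spec_lib; infer_instance

-- ===== CLAIM (what is proved, stated in full; the proofs are below) =====
def Claim_equal_lib : Prop := ∀ (x : Int) (b : Int), Dom_lib x b → Spec_lib x b (lib x b)

-- ===== LEMMAS AND PROOFS =====

theorem pvEuclid_eq_gcd (c a : Nat) : pvEuclid a c = Nat.gcd c a := by
  induction c using Nat.strong_induction_on generalizing a with
  | _ c ih =>
    unfold pvEuclid
    split
    · simp [*]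
    · rename_i h
      rw [ih (a % c) (Nat.mod_lt _ (Nat.pos_of_ne_zero h))]
      exact (Nat.gcd_rec c a).symm

theorem pvLoopA_eq (ps : List Int) (x : Int) :
    pvLoopA ps x = if ∀ p ∈ ps, ¬ p ∣ x then 1 else 0 := by
  induction ps with
  | nil => simp [pvLoopA]
  | cons p ps ih =>
    simp only [pvLoopA, PySem.Int.mod_eq_zero_iff_dvd, ih, List.mem_cons]
    by_cases h : p ∣ x
    · simp [h]
    · by_cases h2 : ∀ q ∈ ps, ¬ q ∣ x
      · simp [h, h2]
      · simp [h2]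

theorem pvCoprime_iff (x : Int) :
    Nat.gcd 9699690 x.natAbs = 1 ↔ ∀ p ∈ pvPrimes, ¬ p ∣ x := by
  have hdvd : ∀ p : Nat, (p : Int) ∣ x ↔ p ∣ x.natAbs := by
    intro p
    rw [← Int.natAbs_dvd_natAbs]
    simp
  constructor
  · intro h p hp
    have hpd : (p.natAbs : Nat) ∣ 9699690 := by
      fin_cases hp <;> norm_num
    intro hdx
    have : (p.natAbs : Nat) ∣ x.natAbs := Int.natAbs_dvd_natAbs.mpr hdx
    have h2 : (p.natAbs : Nat) ∣ Nat.gcd 9699690 x.natAbs := Nat.dvd_gcd hpd this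
    rw [h, Nat.dvd_one] at h2
    have hp1 : 2 ≤ p.natAbs := by fin_cases hp <;> norm_num
    omega
  · intro h
    have hn : ∀ p : Nat, (p : Int) ∈ pvPrimes → ¬ p ∣ x.natAbs := by
      intro p hp hd
      exact h _ hp ((hdvd p).mpr hd)
    have hc : Nat.Coprime (2 * 3 * 5 * 7 * 11 * 13 * 17 * 19) x.natAbs := by
      repeat' apply Nat.Coprime.mul_left
      all_goals rw [Nat.Prime.coprime_iff_not_dvd (by norm_num)]
      · exact hn 2 (by norm_num [pvPrimes])
      · exact hn 3 (by norm_num [pvPrimes])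
      · exact hn 5 (by norm_num [pvPrimes])
      · exact hn 7 (by norm_num [pvPrimes])
      · exact hn 11 (by norm_num [pvPrimes])
      · exact hn 13 (by norm_num [pvPrimes])
      · exact hn 17 (by norm_num [pvPrimes])
      · exact hn 19 (by norm_num [pvPrimes])
    have he : (2 * 3 * 5 * 7 * 11 * 13 * 17 * 19 : Nat) = 9699690 := by norm_num
    rw [he] at hc
    exact hc

-- ===== VERDICT (by name: the statement is the Claim_ definition above) =====
theorem lib_spec : Claim_equal_lib := by
  intro x b _
  unfold Spec_lib lib lib_alt
  by_cases hb : b = 0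
  · simp [hb]
  · simp only [if_neg hb]
    rw [pvLoopA_eq, pvEuclid_eq_gcd]
    simp only [pvCoprime_iff]
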